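-- pv_equiv track=rewrite | github.com/wvogel/backup-sentinel | app/services/pbs.py | _is_encrypted
-- ===== SOURCE A (Python) =====
-- from typing import Any
--
-- def _is_encrypted(files: list[dict[str, Any]] | None) -> bool | None:
--     """Determine encryption state from PBS snapshot file list."""
--     if not files:
--         return None
--     data_files = [
--         f
--         for f in files
--         if isinstance(f, dict) and not str(f.get("filename", "")).endswith((".log.blob", ".catalog.pcat1.didx"))
--     ]
--     if not data_files:
--         return None
--     modes = {str(f.get("crypt-mode") or "none") for f in data_files}
--     if "encrypt" in modes:
--         return True
--     if modes <= {"none", "sign-only"}: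
--         return False
--     return None
-- ===== SOURCE B (Python) =====
-- _RANK = {"none": 0, "sign-only": 0, "encrypt": 2}
-- _VERDICT = (False, None, True)
--
-- def _is_encrypted(files):
--     """Severity-max scan: rank each data file's crypt-mode (plain=0, unknown=1,
--     encrypted=2), keep the running maximum with an early break, and look the
--     verdict up in a table."""
--     if not files:
--         return None
--     best = -1
--     for f in files:
--         if not isinstance(f, dict):
--             continue
--         if str(f.get("filename", "")).endswith((".log.blob", ".catalog.pcat1.didx")):
--             continue
--         r = _RANK.get(str(f.get("crypt-mode") or "none"), 1)
--         if r > best: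
--             best = r
--             if best == 2:
--                 break
--     return None if best < 0 else _VERDICT[best]
-- ===== Notes on version B (the rewrite author's own statement) =====
-- stated objective: alternative
-- what changed: Replaces the filtered-list + mode-set construction and membership/subset tests with a numeric severity scan: each data file's crypt-mode is ranked (none/sign-only=0, unknown=1, encrypt=2) via a table, only the running maximum is kept (with an early break once 2 is reached), and the verdict is a table lookup on that maximum.
import Mathlib
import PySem

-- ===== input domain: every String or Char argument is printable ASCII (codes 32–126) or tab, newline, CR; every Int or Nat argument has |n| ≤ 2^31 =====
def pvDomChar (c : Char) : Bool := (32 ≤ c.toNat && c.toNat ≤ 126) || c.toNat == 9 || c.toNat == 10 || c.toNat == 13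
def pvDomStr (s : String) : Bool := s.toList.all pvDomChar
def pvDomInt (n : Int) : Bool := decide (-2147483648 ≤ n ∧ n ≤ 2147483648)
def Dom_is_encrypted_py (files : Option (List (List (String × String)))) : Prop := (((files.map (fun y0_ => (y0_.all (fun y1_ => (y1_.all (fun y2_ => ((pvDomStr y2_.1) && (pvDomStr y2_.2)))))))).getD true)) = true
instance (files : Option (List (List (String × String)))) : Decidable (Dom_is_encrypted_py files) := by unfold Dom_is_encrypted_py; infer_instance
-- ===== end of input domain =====

-- B replaces the filtered list + set of modes with a numeric severity scan (rank
-- table, running maximum with early break, verdict table); same return value.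

-- shared literal sub-expressions of both Pythons:
-- str(f.get("filename", ""))  — values are strings, so str() is the identity
def pvFname (f : List (String × String)) : String :=
  PySem.Dict.getD (PySem.Dict.mk f) "filename" ""

-- str(f.get("crypt-mode") or "none")  — None or "" falls back to "none"
def pvMode (f : List (String × String)) : String :=
  match PySem.Dict.get? (PySem.Dict.mk f) "crypt-mode" with
  | none => "none"
  | some s => if s = "" then "none" else s

-- ===== PORT A =====
def is_encrypted_py (files : Option (List (List (String × String)))) : Option Bool :=
  match files with
  | none => none
  | some fs =>
    if fs = [] then none
    else
      -- isinstance(f, dict) is always true under the type convention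
      let data_files := fs.filter (fun f =>
        !(PySem.Str.endswith (pvFname f) ".log.blob" ||
          PySem.Str.endswith (pvFname f) ".catalog.pcat1.didx"))
      if data_files = [] then none
      else
        let modes := PySem.Set.ofList (data_files.map pvMode)
        if PySem.Set.contains modes "encrypt" then some true
        else if PySem.Set.issubset modes ["none", "sign-only"] then some false
        else none

-- ===== PORT B =====
-- _RANK = {"none": 0, "sign-only": 0, "encrypt": 2}
def pvRankTbl : PySem.Dict String Int :=
  PySem.Dict.mk [("none", 0), ("sign-only", 0), ("encrypt", 2)]

-- the for-loop of Source B over files, accumulating best; 'break' once best == 2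
def pvLoop : List (List (String × String)) → Int → Int
  | [], best => best
  | f :: fs, best =>
    if PySem.Str.endswith (pvFname f) ".log.blob" ||
       PySem.Str.endswith (pvFname f) ".catalog.pcat1.didx" then
      pvLoop fs best
    else
      let r := PySem.Dict.getD pvRankTbl (pvMode f) 1
      let best' := if r > best then r else best
      if best' = 2 then best' else pvLoop fs best'

def is_encrypted_py_alt (files : Option (List (List (String × String)))) : Option Bool :=
  match files with
  | none => none
  | some fs =>
    if fs = [] then none
    else
      let best := pvLoop fs (-1)
      -- None if best < 0 else _VERDICT[best]; the tuple lookup _VERDICT[best]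
      -- (best ∈ {0,1,2} here) is written as the if-chain below
      if best < 0 then none
      else if best = 0 then some false
      else if best = 1 then none
      else some true

-- ===== PRECONDITION & SPEC =====
def Spec_is_encrypted_py (files : Option (List (List (String × String)))) (out : Option Bool) : Prop := out = is_encrypted_py_alt files
instance (files : Option (List (List (String × String)))) (out : Option Bool) : Decidable (Spec_is_encrypted_py files out) := by unfold Spec_is_encrypted_py; infer_instance

-- ===== CLAIM =====
def Claim_equal_is_encrypted_py : Prop := ∀ (files : Option (List (List (String × String)))), Dom_is_encrypted_py files → Spec_is_encrypted_py files (is_encrypted_py files)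

-- ===== LEMMAS AND PROOFS =====

def pvKeep (f : List (String × String)) : Bool :=
  !(PySem.Str.endswith (pvFname f) ".log.blob" ||
    PySem.Str.endswith (pvFname f) ".catalog.pcat1.didx")

def pvRank (f : List (String × String)) : Int :=
  PySem.Dict.getD pvRankTbl (pvMode f) 1

theorem pvRank_cases (f : List (String × String)) :
    (pvMode f = "encrypt" ∧ pvRank f = 2) ∨
    ((pvMode f = "none" ∨ pvMode f = "sign-only") ∧ pvRank f = 0) ∨
    (pvMode f ≠ "encrypt" ∧ pvMode f ≠ "none" ∧ pvMode f ≠ "sign-only" ∧ pvRank f = 1) := by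
  by_cases h1 : pvMode f = "encrypt"
  · exact Or.inl ⟨h1, by simp [pvRank, pvRankTbl, PySem.Dict.getD, PySem.Dict.get?, h1]⟩
  · by_cases h2 : pvMode f = "none"
    · exact Or.inr (Or.inl ⟨Or.inl h2, by
        simp [pvRank, pvRankTbl, PySem.Dict.getD, PySem.Dict.get?, h2]⟩)
    · by_cases h3 : pvMode f = "sign-only"
      · exact Or.inr (Or.inl ⟨Or.inr h3, by
          simp [pvRank, pvRankTbl, PySem.Dict.getD, PySem.Dict.get?, h3]⟩)
      · refine Or.inr (Or.inr ⟨h1, h2, h3, ?_⟩)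
        have e1 : (("none" : String) == pvMode f) = false :=
          beq_eq_false_iff_ne.mpr (fun h => h2 h.symm)
        have e2 : (("sign-only" : String) == pvMode f) = false :=
          beq_eq_false_iff_ne.mpr (fun h => h3 h.symm)
        have e3 : (("encrypt" : String) == pvMode f) = false :=
          beq_eq_false_iff_ne.mpr (fun h => h1 h.symm)
        simp [pvRank, pvRankTbl, PySem.Dict.getD, PySem.Dict.get?, List.find?, e1, e2, e3]

theorem pvRank_bounds (f : List (String × String)) : 0 ≤ pvRank f ∧ pvRank f ≤ 2 := by
  rcases pvRank_cases f with ⟨_, h⟩ | ⟨_, h⟩ | ⟨_, _, _, h⟩ <;> rw [h] <;> omega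

-- max of start and a list, with everything ≤ 2, stays ≤ 2 and absorbs at 2
theorem foldl_max_two (rs : List Int) (h : ∀ r ∈ rs, r ≤ 2) :
    rs.foldl max 2 = 2 := by
  induction rs with
  | nil => rfl
  | cons r rs ih =>
    have h2 : max 2 r = 2 := by have := h r (by simp); omega
    simp only [List.foldl_cons, h2]
    exact ih (fun r hr => h r (by simp [hr]))

-- B's loop computes the maximum of start and ranks of kept files
theorem pvLoop_eq (fs : List (List (String × String))) (best : Int) (hb : best ≤ 2) :
    pvLoop fs best = ((fs.filter pvKeep).map pvRank).foldl max best := by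
  induction fs generalizing best with
  | nil => rfl
  | cons f fs ih =>
    rw [pvLoop]
    by_cases h1 : (PySem.Str.endswith (pvFname f) ".log.blob" ||
        PySem.Str.endswith (pvFname f) ".catalog.pcat1.didx") = true
    · have hk : pvKeep f = false := by rw [pvKeep, h1]; rfl
      rw [if_pos h1, ih best hb, List.filter_cons_of_neg (by simp [hk])]
    · have hc := eq_false_of_ne_true h1
      have hk : pvKeep f = true := by rw [pvKeep, hc]; rfl
      have hr := pvRank_bounds f
      rw [if_neg h1, List.filter_cons_of_pos hk, List.map_cons, List.foldl_cons]
      have hgr : PySem.Dict.getD pvRankTbl (pvMode f) 1 = pvRank f := rfl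
      simp only [hgr, gt_iff_lt]
      have hbst : (if best < pvRank f then pvRank f else best) = max best (pvRank f) := by
        split_ifs with h <;> omega
      rw [hbst]
      by_cases h2 : max best (pvRank f) = 2
      · rw [if_pos h2, h2]
        exact (foldl_max_two _ (by
          intro r hrm
          obtain ⟨g, _, hge⟩ := List.mem_map.mp hrm
          exact hge ▸ (pvRank_bounds g).2)).symm
      · rw [if_neg h2]
        exact ih (max best (pvRank f)) (by omega)

-- elementary facts about the running maximum
theorem pvSelf_le_foldl_max (rs : List Int) (b : Int) : b ≤ rs.foldl max b := by
  induction rs generalizing b with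
  | nil => simp
  | cons r rs ih => exact le_trans (le_max_left b r) (ih (max b r))

theorem pvElem_le_foldl_max (rs : List Int) (b r : Int) (hr : r ∈ rs) :
    r ≤ rs.foldl max b := by
  induction rs generalizing b with
  | nil => cases hr
  | cons r' rs ih =>
    rw [List.foldl_cons]
    rcases List.mem_cons.mp hr with h | h
    · subst h
      exact le_trans (le_max_right b r) (pvSelf_le_foldl_max rs (max b r))
    · exact ih (max b r') h

theorem pvFoldl_max_le (rs : List Int) (b c : Int) (hb : b ≤ c)
    (h : ∀ r ∈ rs, r ≤ c) : rs.foldl max b ≤ c := by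
  induction rs generalizing b with
  | nil => exact hb
  | cons r rs ih =>
    exact ih (max b r) (max_le hb (h r (by simp)))
      (fun r' hr' => h r' (by simp [hr']))

theorem pvFoldl_max_mem (rs : List Int) (b : Int) :
    rs.foldl max b = b ∨ rs.foldl max b ∈ rs := by
  induction rs generalizing b with
  | nil => exact Or.inl rfl
  | cons r rs ih =>
    rcases ih (max b r) with h | h
    · rcases max_choice b r with hm | hm
      · exact Or.inl (by rw [List.foldl_cons, h, hm])
      · exact Or.inr (by rw [List.foldl_cons, h, hm]; simp)
    · exact Or.inr (by simp [h])

-- ranks of the kept files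
theorem pvRank_mem_bounds (L : List (List (String × String))) (r : Int)
    (hr : r ∈ L.map pvRank) : 0 ≤ r ∧ r ≤ 2 := by
  obtain ⟨g, _, hge⟩ := List.mem_map.mp hr
  exact hge ▸ pvRank_bounds g

theorem is_encrypted_py_spec : Claim_equal_is_encrypted_py := by
  intro files _
  unfold Spec_is_encrypted_py is_encrypted_py is_encrypted_py_alt
  match files with
  | none => rfl
  | some fs =>
    by_cases hnil : fs = []
    · simp [hnil]
    · simp only [hnil, if_false]
      rw [show (fun f => !(PySem.Str.endswith (pvFname f) ".log.blob" ||
          PySem.Str.endswith (pvFname f) ".catalog.pcat1.didx")) = pvKeep from rfl]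
      rw [pvLoop_eq fs (-1) (by omega)]
      set L := fs.filter pvKeep with hLdef
      set rs := L.map pvRank with hrsdef
      set m := rs.foldl max (-1) with hmdef
      by_cases hL : L = []
      · have hrsnil : rs = [] := by rw [hrsdef, hL]; rfl
        have hm : m = -1 := by rw [hmdef, hrsnil]; rfl
        simp [hL, hm]
      · obtain ⟨f0, hf0⟩ := List.exists_mem_of_ne_nil L hL
        have hmem0 : pvRank f0 ∈ rs := hrsdef ▸ List.mem_map.mpr ⟨f0, hf0, rfl⟩
        have hm0 : 0 ≤ m :=
          le_trans (pvRank_bounds f0).1 (pvElem_le_foldl_max rs (-1) _ hmem0)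
        have hm2 : m ≤ 2 := pvFoldl_max_le rs (-1) 2 (by omega)
          (fun r hr => (pvRank_mem_bounds L r (hrsdef ▸ hr)).2)
        have hmmem : m ∈ rs := by
          rcases pvFoldl_max_mem rs (-1) with h | h
          · rw [← hmdef] at h; omega
          · exact hmdef ▸ h
        by_cases hmtop : m = 2
        · -- some data file is encrypted
          have hcon : PySem.Set.contains (PySem.Set.ofList (L.map pvMode)) "encrypt" = true := by
            obtain ⟨g, hg, hge⟩ := List.mem_map.mp (hrsdef ▸ (hmtop ▸ hmmem))
            have hmode : pvMode g = "encrypt" := by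
              rcases pvRank_cases g with ⟨h, _⟩ | ⟨_, h⟩ | ⟨_, _, _, h⟩
              · exact h
              · omega
              · omega
            simp only [PySem.Set.contains, List.contains_iff_mem, PySem.Set.mem_ofList]
            exact List.mem_map.mpr ⟨g, hg, hmode⟩
          rw [if_neg hL, if_pos hcon, hmtop]
          norm_num
        · have hcon : PySem.Set.contains (PySem.Set.ofList (L.map pvMode)) "encrypt" = false := by
            rw [Bool.eq_false_iff]
            intro hc
            simp only [PySem.Set.contains, List.contains_iff_mem, PySem.Set.mem_ofList] at hc
            obtain ⟨g, hg, hge⟩ := List.mem_map.mp hc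
            have hr2 : pvRank g = 2 := by
              rcases pvRank_cases g with ⟨_, h⟩ | ⟨h, _⟩ | ⟨h, _, _, _⟩
              · exact h
              · rcases h with h | h <;> simp [hge] at h
              · exact absurd hge h
            have := pvElem_le_foldl_max rs (-1)
              (pvRank g) (hrsdef ▸ List.mem_map.mpr ⟨g, hg, rfl⟩)
            rw [← hmdef] at this; omega
          by_cases hmzero : m = 0
          · -- all kept files plain: subset holds
            have hsub : PySem.Set.issubset (PySem.Set.ofList (L.map pvMode))
                ["none", "sign-only"] = true := by
              simp only [PySem.Set.issubset, List.all_eq_true, PySem.Set.mem_ofList]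
              intro x hx
              obtain ⟨g, hg, hge⟩ := List.mem_map.mp hx
              have hle := pvElem_le_foldl_max rs (-1)
                (pvRank g) (hrsdef ▸ List.mem_map.mpr ⟨g, hg, rfl⟩)
              rw [← hmdef] at hle
              have hge0 := (pvRank_bounds g).1
              have hr0 : pvRank g = 0 := by omega
              rcases pvRank_cases g with ⟨_, h⟩ | ⟨h, _⟩ | ⟨_, _, _, h⟩
              · omega
              · subst hge; rcases h with h | h <;> simp [h]
              · omega
            rw [if_neg hL, if_neg (by rw [hcon]; exact Bool.false_ne_true : ¬(PySem.Set.ofList (List.map pvMode L)).contains "encrypt" = true),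
              if_pos hsub, hmzero]
            norm_num
          · -- m = 1: an unknown mode exists, subset fails
            have hmone : m = 1 := by omega
            have hsub : PySem.Set.issubset (PySem.Set.ofList (L.map pvMode))
                ["none", "sign-only"] = false := by
              obtain ⟨g, hg, hge⟩ := List.mem_map.mp (hrsdef ▸ (hmone ▸ hmmem))
              have hmode : pvMode g ≠ "none" ∧ pvMode g ≠ "sign-only" := by
                rcases pvRank_cases g with ⟨_, h⟩ | ⟨_, h⟩ | ⟨_, h2, h3, _⟩
                · omega
                · omega
                · exact ⟨h2, h3⟩
              rw [Bool.eq_false_iff]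
              intro hs
              simp only [PySem.Set.issubset, List.all_eq_true, PySem.Set.mem_ofList] at hs
              have := hs (pvMode g) (List.mem_map.mpr ⟨g, hg, rfl⟩)
              simp [hmode.1, hmode.2] at this
            rw [if_neg hL, if_neg (by rw [hcon]; exact Bool.false_ne_true : ¬(PySem.Set.ofList (List.map pvMode L)).contains "encrypt" = true),
              if_neg (by rw [hsub]; exact Bool.false_ne_true : ¬(PySem.Set.ofList (List.map pvMode L)).issubset ["none", "sign-only"] = true),
              hmone]
            norm_num
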